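-- pv_equiv track=rewrite | github.com/pritykovskaya/MarkovChain | generate.py | find_and_delete_first_longest_sentence_from_paragraph
-- ===== SOURCE A (Python) =====
-- def find_and_delete_first_longest_sentence_from_paragraph(paragraph):
--     sentences_dict = {}
--     longest_sentence_len = 0
--     for sentence in paragraph:
--         sentence_len = len(sentence.split(" "))
--         sentences_dict[sentence] = sentence_len
--         if longest_sentence_len < sentence_len:
--             longest_sentence_len = sentence_len
--
--     for sentence in sentences_dict:
--         if sentences_dict[sentence] == longest_sentence_len:
--             del sentences_dict[sentence]
--             return list(sentences_dict.keys())
-- ===== SOURCE B (Python) =====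
-- def find_and_delete_first_longest_sentence_from_paragraph(paragraph):
--     # One pass with a held-out champion: the current first-longest sentence is
--     # kept aside; everything else accumulates in prefix/suffix around it.
--     seen = set()
--     champ = None
--     champ_len = 0
--     prefix = []
--     suffix = []
--     for s in paragraph:
--         if s in seen:
--             continue
--         seen.add(s)
--         n = len(s.split(" "))
--         if champ is None or n > champ_len:
--             if champ is not None:
--                 prefix = prefix + [champ] + suffix
--                 suffix = []
--             champ = s
--             champ_len = n
--         else:
--             suffix.append(s)
--     if champ is None:
--         return None
--     return prefix + suffix
-- ===== Notes on version B (the rewrite author's own statement) =====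
-- stated objective: alternative
-- what changed: A's two-phase dict build (running max) plus key-scan deletion is replaced by a single pass holding the current longest sentence aside as a champion while accumulating prefix/suffix around it; no dict, no second scan, no max/index search.
-- outside the precondition, e.g. on find_and_delete_first_longest_sentence_from_paragraph([]): A returns None, B returns None
import Mathlib
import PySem

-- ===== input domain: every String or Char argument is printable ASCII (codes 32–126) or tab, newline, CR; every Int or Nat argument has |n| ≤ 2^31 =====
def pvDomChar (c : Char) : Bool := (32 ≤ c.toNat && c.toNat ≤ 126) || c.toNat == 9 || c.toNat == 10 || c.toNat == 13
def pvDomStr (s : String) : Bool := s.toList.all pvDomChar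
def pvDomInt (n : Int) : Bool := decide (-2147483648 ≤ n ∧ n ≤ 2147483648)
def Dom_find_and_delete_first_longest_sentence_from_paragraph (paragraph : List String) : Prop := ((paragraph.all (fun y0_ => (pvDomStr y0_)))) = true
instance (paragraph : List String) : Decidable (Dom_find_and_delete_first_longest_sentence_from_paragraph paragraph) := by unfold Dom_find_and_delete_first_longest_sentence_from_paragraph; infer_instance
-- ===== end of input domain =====

-- B replaces A's dict-build pass + key-scan deletion by a single pass that holds the
-- current longest sentence aside as a champion while accumulating prefix/suffix; objective: alternative, same asymptotic cost.

-- len(sentence.split(" ")) — used by both Pythons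
def pvSlen (s : String) : Int := (((PySem.Str.split? s " ").getD []).length : Int)

-- ===== PORT A =====
-- A's second loop: scan the dict's keys, delete the first one whose value equals `longest`, return the remaining keys
def pvScanA (d : PySem.Dict String Int) (longest : Int) : List String → List String
  | [] => []
  | k :: rest => if d.getD k 0 == longest then (d.erase k).keys else pvScanA d longest rest

def find_and_delete_first_longest_sentence_from_paragraph (paragraph : List String) : List String :=
  let st := paragraph.foldl
    (fun (p : PySem.Dict String Int × Int) sentence =>
      (p.1.insert sentence (pvSlen sentence),
       if p.2 < pvSlen sentence then pvSlen sentence else p.2))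
    (PySem.Dict.empty, 0)
  pvScanA st.1 st.2 st.1.keys

-- ===== PORT B =====
-- state: (seen set, champion (sentence, length), prefix, suffix)
def pvStepB (st : List String × Option (String × Int) × List String × List String) (s : String) :
    List String × Option (String × Int) × List String × List String :=
  match st with
  | (seen, champ, pre, suf) =>
    if PySem.Set.contains seen s then st
    else
      let seen' := PySem.Set.add seen s
      let n := pvSlen s
      match champ with
      | none => (seen', some (s, n), pre, suf)
      | some (c, cl) =>
        if cl < n then (seen', some (s, n), pre ++ [c] ++ suf, [])
        else (seen', some (c, cl), pre, suf ++ [s])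

def find_and_delete_first_longest_sentence_from_paragraph_alt (paragraph : List String) : List String :=
  let st := paragraph.foldl pvStepB (PySem.Set.empty, none, [], [])
  match st.2.1 with
  | none => []                 -- Source B: empty paragraph, returns None (excluded by Pre_)
  | some _ => st.2.2.1 ++ st.2.2.2

-- ===== PRECONDITION & SPEC =====
-- Pre_ excludes only the empty paragraph, on which both Pythons fall through and return None, which is not a value of type list.
def Pre_find_and_delete_first_longest_sentence_from_paragraph (paragraph : List String) : Prop := paragraph ≠ []
instance (paragraph : List String) : Decidable (Pre_find_and_delete_first_longest_sentence_from_paragraph paragraph) := by unfold Pre_find_and_delete_first_longest_sentence_from_paragraph; infer_instance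
def pvWitness_find_and_delete_first_longest_sentence_from_paragraph : List String := ["a b", "c"]

def Spec_find_and_delete_first_longest_sentence_from_paragraph (paragraph : List String) (out : List String) : Prop := out = find_and_delete_first_longest_sentence_from_paragraph_alt paragraph
instance (paragraph : List String) (out : List String) : Decidable (Spec_find_and_delete_first_longest_sentence_from_paragraph paragraph out) := by unfold Spec_find_and_delete_first_longest_sentence_from_paragraph; infer_instance

-- ===== CLAIM (what is proved, stated in full; the proofs are below) =====
def Claim_equal_find_and_delete_first_longest_sentence_from_paragraph : Prop := ∀ (paragraph : List String), Dom_find_and_delete_first_longest_sentence_from_paragraph paragraph → Pre_find_and_delete_first_longest_sentence_from_paragraph paragraph → Spec_find_and_delete_first_longest_sentence_from_paragraph paragraph (find_and_delete_first_longest_sentence_from_paragraph paragraph)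

-- ===== LEMMAS AND PROOFS =====

-- every sentence splits into at least one word
theorem pv_go_ne_nil (sep : List Char) : ∀ (fuel : Nat) (l cur : List Char) (acc : List (List Char)),
    PySem.Chars.splitOn.go sep fuel l cur acc ≠ [] := by
  intro fuel
  induction fuel with
  | zero => intro l cur acc; simp [PySem.Chars.splitOn.go]
  | succ n ih =>
    intro l cur acc
    cases l with
    | nil => simp [PySem.Chars.splitOn.go]
    | cons c rest =>
      rw [PySem.Chars.splitOn.go]
      split
      · exact ih _ _ _
      · exact ih _ _ _

theorem pvSlen_pos (s : String) : 1 ≤ pvSlen s := by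
  have h := pv_go_ne_nil [' '] (s.length + 1) s.toList [] []
  simp [pvSlen, PySem.Str.split?, PySem.Chars.split?, PySem.Chars.splitOn]
  have := List.length_pos_iff.mpr h
  omega

-- A's first loop builds the dict: its items are the deduped sentences paired with their lengths
theorem pv_dict_items : ∀ (p L : List String), L.Nodup →
    (p.foldl (fun d s => d.insert s (pvSlen s))
      (PySem.Dict.mk (L.map (fun s => (s, pvSlen s))))).items
      = (PySem.Set.update L p).map (fun s => (s, pvSlen s)) := by
  intro p
  induction p with
  | nil => intro L _; simp [PySem.Set.update]
  | cons s t ih =>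
    intro L hL
    have hkeys : (PySem.Dict.mk (L.map (fun s => (s, pvSlen s))) : PySem.Dict String Int).keys = L := by
      simp [PySem.Dict.keys, Function.comp_def]
    by_cases hs : s ∈ L
    · have hc : (PySem.Dict.mk (L.map (fun s => (s, pvSlen s))) : PySem.Dict String Int).contains s = true := by
        rw [PySem.Dict.contains_iff_mem_keys, hkeys]; exact hs
      have hins : (PySem.Dict.mk (L.map (fun s => (s, pvSlen s))) : PySem.Dict String Int).insert s (pvSlen s)
          = PySem.Dict.mk (L.map (fun s => (s, pvSlen s))) := by
        apply PySem.Dict.ext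
        rw [PySem.Dict.items_insert_of_contains _ _ hc]
        simp only [List.map_map]
        apply List.map_congr_left
        intro x _
        by_cases hx : x = s
        · simp [hx]
        · simp [Function.comp, hx]
      have hadd : PySem.Set.add L s = L := by
        simp [PySem.Set.add, PySem.Set.contains, hs]
      simp only [List.foldl_cons, hins, PySem.Set.update, hadd] at *
      exact ih L hL
    · have hc : (PySem.Dict.mk (L.map (fun s => (s, pvSlen s))) : PySem.Dict String Int).contains s = false := by
        rw [← Bool.not_eq_true, PySem.Dict.contains_iff_mem_keys, hkeys]; exact hs
      have hins : (PySem.Dict.mk (L.map (fun s => (s, pvSlen s))) : PySem.Dict String Int).insert s (pvSlen s)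
          = PySem.Dict.mk ((L ++ [s]).map (fun s => (s, pvSlen s))) := by
        apply PySem.Dict.ext
        rw [PySem.Dict.items_insert_of_not_contains _ _ hc]
        simp
      have hadd : PySem.Set.add L s = L ++ [s] := by
        simp [PySem.Set.add, PySem.Set.contains, hs]
      have hnd : (L ++ [s]).Nodup := by
        refine hL.append (List.nodup_singleton s) ?_
        intro a ha hb
        rw [List.mem_singleton] at hb
        exact hs (hb ▸ ha)
      simp only [List.foldl_cons, hins, PySem.Set.update, hadd] at *
      exact ih (L ++ [s]) hnd

theorem pv_dict_items0 (p : List String) :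
    (p.foldl (fun d s => d.insert s (pvSlen s)) PySem.Dict.empty).items
      = (PySem.List.dedup p).map (fun s => (s, pvSlen s)) := by
  have h := pv_dict_items p [] List.nodup_nil
  simpa [PySem.Dict.empty, PySem.Set.update, PySem.List.dedup, PySem.Set.ofList] using h

-- A's running max equals max(lengths) over the deduped list
theorem pv_max_eq (p : List String) (hp : p ≠ []) :
    PySem.List.max? ((PySem.List.dedup p).map pvSlen) (fun x => x)
      = some (p.foldl (fun m s => if m < pvSlen s then pvSlen s else m) 0) := by
  have hfold : p.foldl (fun m s => if m < pvSlen s then pvSlen s else m) 0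
      = p.foldl (fun m s => max m (pvSlen s)) 0 := by
    apply PySem.List.foldl_congr_mem
    intro m s _
    by_cases h : m < pvSlen s <;> simp [h] <;> omega
  rw [hfold]
  generalize hG : p.foldl (fun m s => max m (pvSlen s)) 0 = L
  have hub : ∀ x ∈ p, pvSlen x ≤ L := hG ▸ (PySem.List.le_foldl_max_int p pvSlen 0).2
  have he : L = (p.map pvSlen).foldl max 0 := by rw [← hG, List.foldl_map]
  have hmem : L ∈ p.map pvSlen := by
    rcases PySem.List.foldl_max_mem (p.map pvSlen) 0 with h0 | hm
    · exfalso
      rcases List.exists_mem_of_ne_nil p hp with ⟨s, hs⟩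
      have h1 := hub s hs
      have h2 := pvSlen_pos s
      rw [he, h0] at h1
      omega
    · rw [he]; exact hm
  cases hmax : PySem.List.max? ((PySem.List.dedup p).map pvSlen) (fun x => x) with
  | none =>
    exfalso
    rw [PySem.List.max?_eq_none_iff] at hmax
    simp only [List.map_eq_nil_iff] at hmax
    rcases List.exists_mem_of_ne_nil p hp with ⟨s, hs⟩
    have h2 : s ∈ PySem.List.dedup p := (PySem.List.mem_dedup _ _).mpr hs
    rw [hmax] at h2
    exact absurd h2 (by simp)
  | some m =>
    congr 1
    have hm : m ∈ (PySem.List.dedup p).map pvSlen := PySem.List.max?_mem hmax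
    have hmle : m ≤ L := by
      rcases List.mem_map.mp hm with ⟨s, hs, rfl⟩
      exact hub s ((PySem.List.mem_dedup _ _).mp hs)
    have hLle : L ≤ m := by
      have hin : L ∈ (PySem.List.dedup p).map pvSlen := by
        rcases List.mem_map.mp hmem with ⟨s, hs, rfl⟩
        exact List.mem_map.mpr ⟨s, (PySem.List.mem_dedup _ _).mpr hs, rfl⟩
      exact PySem.List.max?_isMax hmax L hin
    omega

-- A's deletion scan removes exactly the element at the first index where the length hits m
theorem pv_scan_eq : ∀ (rest pre : List String) (d : PySem.Dict String Int) (m : Int) (i : Nat),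
    d.items = (pre ++ rest).map (fun s => (s, pvSlen s)) → (pre ++ rest).Nodup →
    PySem.List.index? (rest.map pvSlen) m = some i →
    pvScanA d m rest = pre ++ (rest.take i ++ rest.drop (i + 1)) := by
  intro rest
  induction rest with
  | nil =>
    intro pre d m i _ _ hi
    simp [PySem.List.index?] at hi
  | cons s t ih =>
    intro pre d m i hitems hnd hi
    have hkeys : d.keys = pre ++ s :: t := by
      simp [PySem.Dict.keys, hitems, Function.comp_def]
    have hndk : d.keys.Nodup := by rw [hkeys]; exact hnd
    have hsmem : (s, pvSlen s) ∈ d.items := by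
      rw [hitems]; exact List.mem_map.mpr ⟨s, by simp, rfl⟩
    have hget : d.getD s 0 = pvSlen s := PySem.Dict.getD_of_mem_items d hsmem hndk 0
    have hspre : s ∉ pre := fun hc =>
      (List.disjoint_of_nodup_append hnd) hc (List.mem_cons_self ..)
    have hst : s ∉ t := by
      have := (List.nodup_append.mp hnd).2.1
      exact (List.nodup_cons.mp this).1
    by_cases hm : pvSlen s = m
    · have hi0 : i = 0 := by
        rw [List.map_cons, hm, PySem.List.index?_cons_self] at hi
        exact (Option.some.inj hi).symm
      rw [pvScanA, if_pos (by rw [hget, hm]; exact beq_self_eq_true m), hi0]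
      have herase : (d.erase s).items = (pre ++ t).map (fun s => (s, pvSlen s)) := by
        show (d.items.filter _) = _
        rw [hitems, List.filter_map]
        congr 1
        simp only [Function.comp_def]
        have hpre : pre.filter (fun x => !(x == s)) = pre := by
          apply List.filter_eq_self.mpr
          intro x hx
          simp only [Bool.not_eq_eq_eq_not, Bool.not_true, beq_eq_false_iff_ne]
          intro hxs; exact hspre (hxs ▸ hx)
        have ht : t.filter (fun x => !(x == s)) = t := by
          apply List.filter_eq_self.mpr
          intro x hx
          simp only [Bool.not_eq_eq_eq_not, Bool.not_true, beq_eq_false_iff_ne]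
          intro hxs; exact hst (hxs ▸ hx)
        rw [List.filter_append, hpre]
        simp [ht]
      show (d.erase s).keys = _
      simp [PySem.Dict.keys, herase, Function.comp_def]
    · have hrec : PySem.List.index? (t.map pvSlen) m = some (i - 1) ∧ 1 ≤ i := by
        rw [List.map_cons, PySem.List.index?_cons_of_ne _ hm] at hi
        rcases Option.map_eq_some_iff.mp hi with ⟨j, hj, hji⟩
        constructor
        · rw [hj]; congr 1; omega
        · omega
      rw [pvScanA, if_neg (by rw [hget]; simp [hm])]
      have := ih (pre ++ [s]) d m (i - 1)
        (by rw [hitems, List.append_assoc]; rfl) (by rwa [List.append_assoc]) hrec.1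
      rw [this]
      rcases Nat.exists_eq_add_of_le hrec.2 with ⟨j, hij⟩
      subst hij
      simp [List.take_succ_cons, List.drop_succ_cons, Nat.add_comm 1 j]

-- canonical state of B's loop after the deduped sentences L have been processed
def pvStateOf (L : List String) : List String × Option (String × Int) × List String × List String :=
  match PySem.List.max? (L.map pvSlen) (fun x => x) with
  | none => (L, none, [], [])
  | some m =>
    let i := (PySem.List.index? (L.map pvSlen) m).getD 0
    (L, some (L.getD i "", m), L.take i, L.drop (i + 1))

theorem pv_nodup_add (L : List String) (hnd : L.Nodup) (s : String) :
    (PySem.Set.add L s).Nodup := by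
  by_cases h : s ∈ L
  · simpa [PySem.Set.add, PySem.Set.contains, h] using hnd
  · have : PySem.Set.add L s = L ++ [s] := by simp [PySem.Set.add, PySem.Set.contains, h]
    rw [this]
    refine hnd.append (List.nodup_singleton s) ?_
    intro a ha hb
    rw [List.mem_singleton] at hb
    exact h (hb ▸ ha)

-- one step of B's loop preserves the canonical state
theorem pv_stepB_eq (L : List String) (hnd : L.Nodup) (s : String) :
    pvStepB (pvStateOf L) s = pvStateOf (PySem.Set.add L s) := by
  by_cases hs : s ∈ L
  · -- duplicate sentence: both sides are unchanged
    have hc : PySem.Set.contains L s = true := by simpa [PySem.Set.contains] using hs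
    have hadd : PySem.Set.add L s = L := by simp [PySem.Set.add, hs]
    rw [hadd]
    unfold pvStateOf
    cases hmax : PySem.List.max? (L.map pvSlen) (fun x => x) <;> simp [pvStepB, hs]
  · have hc : PySem.Set.contains L s = false := by simp [PySem.Set.contains, hs]
    have hadd : PySem.Set.add L s = L ++ [s] := by simp [PySem.Set.add, hs]
    rw [hadd]
    cases hmax : PySem.List.max? (L.map pvSlen) (fun x => x) with
    | none =>
      have hnil : L = [] := by
        have := (PySem.List.max?_eq_none_iff _ _).mp hmax
        simpa using this
      subst hnil
      have h0 : PySem.List.max? ([] : List Int) (fun x => x) = none := by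
        simp [PySem.List.max?]
      have h1 : PySem.List.max? [pvSlen s] (fun x => x) = some (pvSlen s) := by
        simpa using PySem.List.max?_id_cons (pvSlen s) []
      have h2 : PySem.List.index? [pvSlen s] (pvSlen s) = some 0 :=
        PySem.List.index?_cons_self (pvSlen s) []
      simp [pvStateOf, h0, h1, pvStepB, hs, PySem.Set.add]
    | some m =>
      have hmem_m : m ∈ L.map pvSlen := PySem.List.max?_mem hmax
      obtain ⟨i, hi⟩ : ∃ i, PySem.List.index? (L.map pvSlen) m = some i :=
        Option.isSome_iff_exists.mp ((PySem.List.index?_isSome_iff _ _).mpr hmem_m)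
      obtain ⟨hilt, hieq, -⟩ := PySem.List.getElem_of_index?_eq_some hi
      have hiL : i < L.length := by simpa using hilt
      have hub : ∀ y ∈ L.map pvSlen, y ≤ m := fun y hy => PySem.List.max?_isMax hmax y hy
      -- the appended length list
      have hmap : (L ++ [s]).map pvSlen = L.map pvSlen ++ [pvSlen s] := by simp
      obtain ⟨a, t, rfl⟩ : ∃ a t, L = a :: t := by
        cases L with
        | nil => simp at hiL
        | cons a t => exact ⟨a, t, rfl⟩
      have hm_eq : (t.map pvSlen).foldl max (pvSlen a) = m := by
        have := PySem.List.max?_id_cons (pvSlen a) (t.map pvSlen)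
        rw [List.map_cons] at hmax
        rw [this] at hmax
        exact Option.some.inj hmax
      have hmax' : PySem.List.max? (((a :: t) ++ [s]).map pvSlen) (fun x => x)
          = some (max m (pvSlen s)) := by
        rw [hmap, List.map_cons, List.cons_append,
          PySem.List.max?_id_cons (pvSlen a) (t.map pvSlen ++ [pvSlen s]),
          List.foldl_append, hm_eq]
        simp
      by_cases hlt : m < pvSlen s
      · -- new champion: the old one is flushed back into the prefix
        have hmx : max m (pvSlen s) = pvSlen s := max_eq_right (le_of_lt hlt)
        have hnotmem : pvSlen s ∉ (a :: t).map pvSlen := fun h => absurd (hub _ h) (by omega)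
        have hidx' : PySem.List.index? (((a :: t) ++ [s]).map pvSlen) (pvSlen s)
            = some ((a :: t).map pvSlen).length := by
          rw [hmap]; exact PySem.List.index?_append_singleton_self _ _ hnotmem
        have hgd : ((a :: t) ++ [s]).getD ((a :: t).length) "" = s := by
          simp [List.getD_eq_getElem?_getD]
        simp only [pvStateOf, hmax, hi, Option.getD_some, pvStepB, hc, Bool.false_eq_true,
          if_false, hmax', hidx', hmx]
        simp only [List.length_map] at *
        simp [hlt, List.drop_eq_nil_of_le]
        refine ⟨by simp [PySem.Set.add, hs], ?_⟩
        have h1 : (a :: t)[i]?.getD "" = (a :: t)[i] := by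
          simp [List.getElem?_eq_getElem hiL]
        rw [h1, show List.drop i t = List.drop (i + 1) (a :: t) from rfl,
          ← List.drop_eq_getElem_cons hiL, List.take_append_drop]
      · -- champion unchanged: the new sentence joins the suffix
        have hmx : max m (pvSlen s) = m := max_eq_left (by omega)
        have hidx' : PySem.List.index? (((a :: t) ++ [s]).map pvSlen) m = some i := by
          rw [hmap, PySem.List.index?_append_of_mem _ hmem_m]; exact hi
        simp only [pvStateOf, hmax, hi, Option.getD_some, pvStepB, hc, Bool.false_eq_true,
          if_false, hmax', hidx', hmx]
        have hile : i ≤ t.length := by simpa [Nat.lt_succ_iff] using hiL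
        simp [hlt, PySem.Set.add, hs, List.drop_append_of_le_length hile]
        constructor
        · exact congrArg (fun o => o.getD "") (List.getElem?_append_left hiL).symm
        · exact (List.take_append_of_le_length (le_of_lt hiL)).symm

theorem pv_foldB_eq : ∀ (p L : List String), L.Nodup →
    p.foldl pvStepB (pvStateOf L) = pvStateOf (PySem.Set.update L p) := by
  intro p
  induction p with
  | nil => intro L _; simp [PySem.Set.update]
  | cons s t ih =>
    intro L hnd
    simp only [List.foldl_cons, pv_stepB_eq L hnd s, PySem.Set.update]
    exact ih _ (pv_nodup_add L hnd s)

-- ===== VERDICT (by name: the statement is the Claim_ definition above) =====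
theorem find_and_delete_first_longest_sentence_from_paragraph_spec : Claim_equal_find_and_delete_first_longest_sentence_from_paragraph := by
  intro paragraph _ hpre
  unfold Spec_find_and_delete_first_longest_sentence_from_paragraph
  unfold find_and_delete_first_longest_sentence_from_paragraph
  unfold find_and_delete_first_longest_sentence_from_paragraph_alt
  rw [PySem.List.foldl_prod_mk
    (fun (d : PySem.Dict String Int) (s : String) => d.insert s (pvSlen s))
    (fun (m : Int) (s : String) => if m < pvSlen s then pvSlen s else m)
    paragraph PySem.Dict.empty 0]
  set D := paragraph.foldl (fun d s => d.insert s (pvSlen s)) PySem.Dict.empty with hD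
  set ℓ := paragraph.foldl (fun m s => if m < pvSlen s then pvSlen s else m) 0 with hℓ
  set seen := PySem.List.dedup paragraph with hseen
  have hitems : D.items = seen.map (fun s => (s, pvSlen s)) := pv_dict_items0 paragraph
  have hkeys : D.keys = seen := by simp [PySem.Dict.keys, hitems, Function.comp_def]
  have hmax := pv_max_eq paragraph hpre
  rw [← hseen, ← hℓ] at hmax
  have hmem : ℓ ∈ seen.map pvSlen := PySem.List.max?_mem hmax
  have hidx : ∃ i, PySem.List.index? (seen.map pvSlen) ℓ = some i := by
    have := (PySem.List.index?_isSome_iff (seen.map pvSlen) ℓ).mpr hmem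
    exact Option.isSome_iff_exists.mp this
  rcases hidx with ⟨i, hi⟩
  have hnd : seen.Nodup := PySem.List.nodup_dedup paragraph
  have hscan := pv_scan_eq seen [] D ℓ i (by simpa using hitems) (by simpa using hnd) hi
  -- B's fold reaches the canonical state of the deduped list
  have hinit : (PySem.Set.empty, none, ([] : List String), ([] : List String)) = pvStateOf [] := by
    simp [pvStateOf, PySem.List.max?, PySem.Set.empty]
  have hfoldB : paragraph.foldl pvStepB (PySem.Set.empty, none, [], []) = pvStateOf seen := by
    rw [hinit, pv_foldB_eq paragraph [] List.nodup_nil]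
    simp [hseen, PySem.Set.update, PySem.Set.ofList_eq_foldl]
  simp only [hfoldB, pvStateOf, hmax, hi, hkeys]
  simp only [List.nil_append] at hscan
  simp [hscan]
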